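-- pv_equiv track=rewrite | github.com/marcoscannabrava/algos | misc/facebook.py | onesided_count_subarrays
-- ===== SOURCE A (Python) =====
-- def onesided_count_subarrays(arr, order='ltr'):
--     ans = [0] * len(arr)
--     stack = []
--     iterable = range(len(arr)) if order == 'ltr' else range(len(arr) - 1, -1, -1)
--     for i in iterable:
--         while len(stack) > 0 and arr[stack[-1]] < arr[i]:
--             ans[i] += ans[stack.pop()]
--         stack.append(i)
--         ans[i] += 1
--     return ans
-- ===== SOURCE B (Python) =====
-- def onesided_count_subarrays(arr, order='ltr'):
--     n = len(arr)
--     res = []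
--     if order == 'ltr':
--         for i in range(n):
--             j = i - 1
--             while j >= 0 and arr[j] < arr[i]:
--                 j -= 1
--             res.append(i - j)
--     else:
--         for i in range(n):
--             j = i + 1
--             while j < n and arr[j] < arr[i]:
--                 j += 1
--             res.append(j - i)
--     return res
-- ===== Notes on version B (the rewrite author's own statement) =====
-- stated objective: simpler
-- what changed: Replaces A's monotonic stack with in-place answer accumulation by a direct per-element scan: ans[i] is the distance to the nearest previous (ltr) / next (rtl) element with value >= arr[i], found by a plain backward/forward scan with no auxiliary state.
import Mathlib
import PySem

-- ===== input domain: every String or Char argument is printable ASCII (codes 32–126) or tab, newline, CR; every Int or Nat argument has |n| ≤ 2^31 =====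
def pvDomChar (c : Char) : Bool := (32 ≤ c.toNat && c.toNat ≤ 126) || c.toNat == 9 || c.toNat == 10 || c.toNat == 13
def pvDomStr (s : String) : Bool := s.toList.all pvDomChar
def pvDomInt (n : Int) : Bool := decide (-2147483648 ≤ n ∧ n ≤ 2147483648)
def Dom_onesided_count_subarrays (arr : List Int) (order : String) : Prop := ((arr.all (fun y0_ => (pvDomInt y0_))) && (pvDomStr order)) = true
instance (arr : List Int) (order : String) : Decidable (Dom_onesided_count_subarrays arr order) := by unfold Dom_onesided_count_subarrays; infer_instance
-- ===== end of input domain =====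

-- B replaces A's monotonic stack and in-place answer accumulation by a direct per-element
-- scan for the nearest previous (ltr) / next (rtl) element ≥ arr[i]; objective: simpler.

-- ===== PORT A =====
-- `xs[i]` for the non-negative in-range indices both Pythons use (exact there: every index
-- below comes from range(len(arr)) or was pushed from it, so no negative/out-of-range access).
def pyget (xs : List Int) (i : Nat) : Int := xs.getD i 0

-- `xs[i] += v`
def addAt (xs : List Int) (i : Nat) (v : Int) : List Int := xs.set i (xs.getD i 0 + v)

-- the `while len(stack) > 0 and arr[stack[-1]] < arr[i]:` loop (stack head = top)
def aWhile (arr : List Int) (i : Nat) (ans : List Int) (stack : List Nat) : List Int × List Nat :=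
  match stack with
  | [] => (ans, [])
  | t :: s =>
    if pyget arr t < pyget arr i then aWhile arr i (addAt ans i (pyget ans t)) s
    else (ans, t :: s)

-- the `for i in iterable:` loop
def aLoop (arr : List Int) : List Nat → List Int → List Nat → List Int
  | [], ans, _ => ans
  | i :: rest, ans, stack =>
    match aWhile arr i ans stack with
    | (ans1, stack1) => aLoop arr rest (addAt ans1 i 1) (i :: stack1)

def onesided_count_subarrays (arr : List Int) (order : String) : List Int :=
  -- range(len(arr)) vs range(len(arr)-1, -1, -1) (the latter is the reversed index list)
  let idxs := if order = "ltr" then List.range arr.length else (List.range arr.length).reverse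
  aLoop arr idxs (List.replicate arr.length 0) []

-- ===== PORT B =====
-- ltr inner loop: j starts at i-1 and decreases while j >= 0 and arr[j] < x; returns final j
def scanBack (arr : List Int) (x : Int) : Nat → Int
  | 0 => -1
  | j + 1 => if pyget arr j < x then scanBack arr x j else (j : Int)

-- rtl inner loop: j increases while j < len(arr) and arr[j] < x; returns final j
def scanFwd (arr : List Int) (x : Int) (j : Nat) : Nat :=
  if j < arr.length then
    (if pyget arr j < x then scanFwd arr x (j + 1) else j)
  else j
termination_by arr.length - j

def onesided_count_subarrays_alt (arr : List Int) (order : String) : List Int :=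
  if order = "ltr" then
    (List.range arr.length).map (fun (i : Nat) => (i : Int) - scanBack arr (pyget arr i) i)
  else
    (List.range arr.length).map (fun (i : Nat) => (scanFwd arr (pyget arr i) (i + 1) : Int) - (i : Int))

-- ===== PRECONDITION & SPEC =====
def Spec_onesided_count_subarrays (arr : List Int) (order : String) (out : List Int) : Prop := out = onesided_count_subarrays_alt arr order
instance (arr : List Int) (order : String) (out : List Int) : Decidable (Spec_onesided_count_subarrays arr order out) := by unfold Spec_onesided_count_subarrays; infer_instance

-- ===== CLAIM (what is proved, stated in full; the proofs are below) =====
def Claim_equal_onesided_count_subarrays : Prop := ∀ (arr : List Int) (order : String), Dom_onesided_count_subarrays arr order → Spec_onesided_count_subarrays arr order (onesided_count_subarrays arr order)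

-- ===== LEMMAS AND PROOFS =====

-- Abstract model of A's stack loop over processing TIMES 0,1,2,… with value function w
-- (ltr: time = position, w = pyget arr; rtl: time t = position n-1-t).

-- nearest previous time with value ≥ x (as Int, -1 if none): the model of B's backward scan
def sbAux (w : Nat → Int) (x : Int) : Nat → Int
  | 0 => -1
  | j + 1 => if w j < x then sbAux w x j else (j : Int)

-- the while loop in the model: a = answers-by-time, acc accumulates the sum popped into ans[m]
def mWhile (w a : Nat → Int) (m : Nat) (acc : Int) : List Nat → Int × List Nat
  | [] => (acc, [])
  | t :: s => if w t < w m then mWhile w a m (acc + a t) s else (acc, t :: s)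

-- stack invariant below an element u: times decrease, values (weakly) grow downward, and
-- every time in the gap between an element and the element above it has a strictly smaller value
def Chain (w : Nat → Int) : Nat → List Nat → Prop
  | u, [] => ∀ q, q < u → w q < w u
  | u, t :: s => t < u ∧ w u ≤ w t ∧ (∀ q, t < q → q < u → w q < w u) ∧ Chain w t s

-- full stack invariant after m steps
def SInv (w : Nat → Int) (m : Nat) (st : List Nat) : Prop :=
  match m, st with
  | 0, [] => True
  | u + 1, t :: s => t = u ∧ Chain w u s
  | _, _ => False

theorem sbAux_of_all (w : Nat → Int) (x : Int) (k : Nat) (h : ∀ q, q < k → w q < x) :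
    sbAux w x k = -1 := by
  induction k with
  | zero => rfl
  | succ j ih =>
    simp only [sbAux, if_pos (h j (Nat.lt_succ_self j))]
    exact ih (fun q hq => h q (Nat.lt_succ_of_lt hq))

theorem sbAux_of_hit (w : Nat → Int) (x : Int) (t : Nat) :
    ∀ k, t < k → x ≤ w t → (∀ q, t < q → q < k → w q < x) → sbAux w x k = t := by
  intro k
  induction k with
  | zero => intro h; omega
  | succ j ih =>
    intro htk hx hgap
    by_cases hj : t = j
    · subst hj
      simp only [sbAux, if_neg (not_lt.mpr hx)]
    · have htj : t < j := by omega
      have : w j < x := hgap j htj (Nat.lt_succ_self j)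
      simp only [sbAux, if_pos this]
      exact ih htj hx (fun q hq hq' => hgap q hq (Nat.lt_succ_of_lt hq'))

theorem chain_lt (w : Nat → Int) : ∀ (u : Nat) (s : List Nat), Chain w u s → ∀ t ∈ s, t < u := by
  intro u s
  induction s generalizing u with
  | nil => intro _ t ht; cases ht
  | cons x s ih =>
    intro hc t ht
    rcases hc with ⟨hxu, _, _, hcs⟩
    rcases List.mem_cons.mp ht with h | h
    · omega
    · exact lt_trans (ih x hcs t h) hxu

-- the core pop lemma: running the while loop from a chained stack with top u returns
-- acc' = m - 1 - sbAux w (w m) m and a stack chained below m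
theorem mWhile_spec (w a : Nat → Int) (m : Nat) :
    ∀ (s : List Nat) (u : Nat) (acc : Int),
      Chain w u s → u < m → (∀ q, u < q → q < m → w q < w m) →
      (∀ t, t = u ∨ t ∈ s → a t = (t : Int) - sbAux w (w t) t) →
      acc = (m : Int) - 1 - (u : Int) →
      (mWhile w a m acc (u :: s)).1 = (m : Int) - 1 - sbAux w (w m) m ∧
      Chain w m (mWhile w a m acc (u :: s)).2 := by
  intro s
  induction s with
  | nil =>
    intro u acc hc hum hgap ha hacc
    simp only [mWhile]
    split
    · next h =>
      have hsu : sbAux w (w u) u = -1 := sbAux_of_all w (w u) u hc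
      have hau : a u = (u : Int) + 1 := by rw [ha u (Or.inl rfl), hsu]; ring
      have hall : ∀ q, q < m → w q < w m := by
        intro q hq
        rcases lt_trichotomy q u with h' | h' | h'
        · exact lt_trans (hc q h') h
        · exact h' ▸ h
        · exact hgap q h' hq
      have hm : sbAux w (w m) m = -1 := sbAux_of_all w (w m) m hall
      refine ⟨?_, ?_⟩
      · simp only [hm, hau, hacc]; ring
      · exact hall
    · next h =>
      have hm : sbAux w (w m) m = u :=
        sbAux_of_hit w (w m) u m hum (not_lt.mp h) hgap
      exact ⟨by simp [hm, hacc], hum, not_lt.mp h, hgap, hc⟩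
  | cons t s' ih =>
    intro u acc hc hum hgap ha hacc
    rcases hc with ⟨htu, hwu, hgtu, hct⟩
    simp only [mWhile]
    split
    · next h =>
      have hsu : sbAux w (w u) u = t := sbAux_of_hit w (w u) t u htu hwu hgtu
      have hau : a u = (u : Int) - t := by rw [ha u (Or.inl rfl), hsu]
      refine ih t (acc + a u) hct (lt_trans htu hum) ?_ ?_ ?_
      · intro q hq hqm
        rcases lt_trichotomy q u with h' | h' | h'
        · exact lt_trans (hgtu q hq h') h
        · exact h' ▸ h
        · exact hgap q h' hqm
      · intro t' ht'
        rcases ht' with h' | h'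
        · exact ha t' (Or.inr (List.mem_cons.mpr (Or.inl h')))
        · exact ha t' (Or.inr (List.mem_cons.mpr (Or.inr h')))
      · rw [hau, hacc]; ring
    · next h =>
      have hm : sbAux w (w m) m = u :=
        sbAux_of_hit w (w m) u m hum (not_lt.mp h) hgap
      exact ⟨by simp [hm, hacc], hum, not_lt.mp h, hgap, htu, hwu, hgtu, hct⟩

-- combined run lemma including the empty-stack/time-0 case
theorem mWhile_run (w a : Nat → Int) (m : Nat) (st : List Nat) (hS : SInv w m st)
    (ha : ∀ t, t < m → a t = (t : Int) - sbAux w (w t) t) :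
    (mWhile w a m 0 st).1 = (m : Int) - 1 - sbAux w (w m) m ∧
    Chain w m (mWhile w a m 0 st).2 := by
  cases m with
  | zero =>
    cases st with
    | cons x s => exact absurd hS (by simp [SInv])
    | nil =>
      refine ⟨?_, ?_⟩
      · simp [mWhile, sbAux]
      · intro q hq; omega
  | succ u =>
    cases st with
    | nil => exact absurd hS (by simp [SInv])
    | cons x s =>
      rcases hS with ⟨hx, hc⟩
      subst hx
      refine mWhile_spec w a (x + 1) s x 0 hc (Nat.lt_succ_self x) ?_ ?_ ?_
      · intro q hq hq'; omega
      · intro t ht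
        rcases ht with h' | h'
        · exact ha t (h' ▸ Nat.lt_succ_self x)
        · exact ha t (Nat.lt_succ_of_lt (chain_lt w x s hc t h'))
      · push_cast; ring

theorem sinv_lt (w : Nat → Int) (m : Nat) (st : List Nat) (h : SInv w m st) :
    ∀ t ∈ st, t < m := by
  match m, st with
  | 0, [] => intro t ht; cases ht
  | u + 1, x :: s =>
    rcases h with ⟨hx, hc⟩
    intro t ht
    rcases List.mem_cons.mp ht with h' | h'
    · omega
    · have := chain_lt w x s (hx ▸ hc) t h'
      omega

-- list bookkeeping
theorem getD_set_self (xs : List Int) (i : Nat) (v : Int) (h : i < xs.length) :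
    (xs.set i v).getD i 0 = v := by
  simp [List.getD_eq_getElem?_getD, h]

theorem getD_set_ne (xs : List Int) (i j : Nat) (v : Int) (h : i ≠ j) :
    (xs.set i v).getD j 0 = xs.getD j 0 := by
  simp [List.getD_eq_getElem?_getD, List.getElem?_set_ne h]

theorem addAt_zero (xs : List Int) (i : Nat) : addAt xs i 0 = xs := by
  unfold addAt
  rcases Nat.lt_or_ge i xs.length with h | h
  · simp [List.getD_eq_getElem?_getD, List.getElem?_eq_getElem h, List.set_getElem_self]
  · simp [List.set_eq_of_length_le h]

theorem addAt_addAt (xs : List Int) (i : Nat) (v v' : Int) (h : i < xs.length) :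
    addAt (addAt xs i v) i v' = addAt xs i (v + v') := by
  unfold addAt
  simp [List.set_set, List.getD_eq_getElem?_getD, h, add_assoc]

theorem aWhile_length (arr : List Int) (i : Nat) :
    ∀ (st : List Nat) (ans : List Int), (aWhile arr i ans st).1.length = ans.length := by
  intro st
  induction st with
  | nil => intro ans; rfl
  | cons t s ih =>
    intro ans
    simp only [aWhile]
    split
    · rw [ih]; simp [addAt]
    · rfl

theorem aLoop_length (arr : List Int) :
    ∀ (idxs : List Nat) (ans : List Int) (st : List Nat),
      (aLoop arr idxs ans st).length = ans.length := by
  intro idxs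
  induction idxs with
  | nil => intro ans st; rfl
  | cons i rest ih =>
    intro ans st
    simp only [aLoop]
    rw [ih]
    simp [addAt, aWhile_length]

-- bridge for ltr: the real while loop tracks the model
theorem aWhile_rel (arr : List Int) (m : Nat) (ansL : List Int) (hm : m < ansL.length) :
    ∀ (st : List Nat) (acc : Int), (∀ t ∈ st, t < m) →
      aWhile arr m (addAt ansL m acc) st =
        (addAt ansL m (mWhile (pyget arr) (pyget ansL) m acc st).1,
         (mWhile (pyget arr) (pyget ansL) m acc st).2) := by
  intro st
  induction st with
  | nil => intro acc _; rfl
  | cons t s ih =>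
    intro acc hlt
    have htm : t < m := hlt t (List.mem_cons_self ..)
    have hget : pyget (addAt ansL m acc) t = pyget ansL t :=
      getD_set_ne ansL m t _ (by omega)
    simp only [aWhile, mWhile]
    split
    · rw [hget, addAt_addAt ansL m acc (pyget ansL t) hm]
      exact ih (acc + pyget ansL t) (fun t' ht' => hlt t' (List.mem_cons_of_mem t ht'))
    · rfl

theorem aLoop_ltr (arr : List Int) :
    ∀ (k m : Nat) (ansL : List Int) (st : List Nat) (a : Nat → Int),
      m + k = arr.length → ansL.length = arr.length →
      (∀ j, pyget ansL j = a j) →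
      (∀ t, t < m → a t = (t : Int) - sbAux (pyget arr) (pyget arr t) t) →
      (∀ t, m ≤ t → a t = 0) →
      SInv (pyget arr) m st →
      ∀ j, j < arr.length →
        pyget (aLoop arr (List.range' m k) ansL st) j =
          (j : Int) - sbAux (pyget arr) (pyget arr j) j := by
  intro k
  induction k with
  | zero =>
    intro m ansL st a hmk hlen hrel ha1 ha2 hS j hj
    have h0 : List.range' m 0 = [] := rfl
    rw [h0]
    simp only [aLoop]
    rw [hrel j]
    exact ha1 j (by omega)
  | succ k ih =>
    intro m ansL st a hmk hlen hrel ha1 ha2 hS j hj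
    have hm : m < arr.length := by omega
    have hm' : m < ansL.length := by omega
    have hmodel : ∀ t, t < m →
        pyget ansL t = (t : Int) - sbAux (pyget arr) (pyget arr t) t := by
      intro t ht; rw [hrel t]; exact ha1 t ht
    obtain ⟨hacc, hchain⟩ :=
      mWhile_run (pyget arr) (pyget ansL) m st hS hmodel
    have haW : aWhile arr m ansL st =
        (addAt ansL m (mWhile (pyget arr) (pyget ansL) m 0 st).1,
         (mWhile (pyget arr) (pyget ansL) m 0 st).2) := by
      conv_lhs => rw [← addAt_zero ansL m]
      exact aWhile_rel arr m ansL hm' st 0 (sinv_lt (pyget arr) m st hS)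
    rw [List.range'_succ]
    simp only [aLoop, haW]
    rw [addAt_addAt ansL m _ 1 hm']
    refine ih (m + 1) _ _
      (fun t => if t = m then (mWhile (pyget arr) (pyget ansL) m 0 st).1 + 1 else a t)
      (by omega) (by simp [addAt, hlen]) ?_ ?_ ?_ ?_ j hj
    · intro j'
      beta_reduce
      by_cases hjm : j' = m
      · subst hjm
        rw [if_pos rfl]
        unfold pyget addAt
        rw [getD_set_self ansL j' _ hm']
        have h0 : ansL.getD j' 0 = 0 := by
          have := hrel j'; unfold pyget at this; rw [this]; exact ha2 j' (le_refl j')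
        rw [h0]; ring
      · rw [if_neg hjm]
        unfold pyget addAt
        rw [getD_set_ne ansL m j' _ (fun h => hjm h.symm)]
        exact hrel j'
    · intro t ht
      beta_reduce
      by_cases htm : t = m
      · subst htm
        rw [if_pos rfl, hacc]; ring
      · rw [if_neg htm]
        exact ha1 t (by omega)
    · intro t ht
      beta_reduce
      rw [if_neg (by omega)]
      exact ha2 t (by omega)
    · exact ⟨rfl, hchain⟩

theorem scanBack_eq_sbAux (arr : List Int) (x : Int) :
    ∀ k, scanBack arr x k = sbAux (pyget arr) x k := by
  intro k
  induction k with
  | zero => rfl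
  | succ j ih => simp only [scanBack, sbAux, ih]

-- bridge for rtl: time t corresponds to position n-1-t
theorem aWhile_rel_rtl (arr : List Int) (m : Nat) (ansL : List Int)
    (hm : m < arr.length) (hlen : ansL.length = arr.length) :
    ∀ (st : List Nat) (acc : Int), (∀ t ∈ st, t < m) →
      aWhile arr (arr.length - 1 - m) (addAt ansL (arr.length - 1 - m) acc)
          (st.map (fun t => arr.length - 1 - t)) =
        (addAt ansL (arr.length - 1 - m)
          (mWhile (fun t => pyget arr (arr.length - 1 - t))
            (fun t => pyget ansL (arr.length - 1 - t)) m acc st).1,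
         ((mWhile (fun t => pyget arr (arr.length - 1 - t))
            (fun t => pyget ansL (arr.length - 1 - t)) m acc st).2).map
           (fun t => arr.length - 1 - t)) := by
  intro st
  induction st with
  | nil => intro acc _; rfl
  | cons t s ih =>
    intro acc hlt
    have htm : t < m := hlt t (List.mem_cons_self ..)
    have hget : pyget (addAt ansL (arr.length - 1 - m) acc) (arr.length - 1 - t) =
        pyget ansL (arr.length - 1 - t) :=
      getD_set_ne ansL _ _ _ (by omega)
    have hidx : arr.length - 1 - m < ansL.length := by omega
    simp only [aWhile, mWhile, List.map_cons]
    split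
    · rw [hget, addAt_addAt ansL _ acc _ hidx]
      exact ih (acc + pyget ansL (arr.length - 1 - t))
        (fun t' ht' => hlt t' (List.mem_cons_of_mem t ht'))
    · rfl

theorem aLoop_rtl (arr : List Int) :
    ∀ (k m : Nat) (ansL : List Int) (st : List Nat) (a : Nat → Int),
      m + k = arr.length → ansL.length = arr.length →
      (∀ t, t < arr.length → pyget ansL (arr.length - 1 - t) = a t) →
      (∀ t, t < m → a t = (t : Int) -
        sbAux (fun q => pyget arr (arr.length - 1 - q)) (pyget arr (arr.length - 1 - t)) t) →
      (∀ t, m ≤ t → a t = 0) →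
      SInv (fun q => pyget arr (arr.length - 1 - q)) m st →
      ∀ t, t < arr.length →
        pyget (aLoop arr ((List.range k).reverse) ansL (st.map (fun q => arr.length - 1 - q)))
            (arr.length - 1 - t) =
          (t : Int) - sbAux (fun q => pyget arr (arr.length - 1 - q)) (pyget arr (arr.length - 1 - t)) t := by
  intro k
  induction k with
  | zero =>
    intro m ansL st a hmk hlen hrel ha1 ha2 hS t ht
    have h0 : (List.range 0).reverse = ([] : List Nat) := rfl
    rw [h0]
    simp only [aLoop]
    rw [hrel t ht]
    exact ha1 t (by omega)
  | succ k ih =>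
    intro m ansL st a hmk hlen hrel ha1 ha2 hS t ht
    have hm : m < arr.length := by omega
    have hk : k = arr.length - 1 - m := by omega
    have hik : k < ansL.length := by omega
    have hmodel : ∀ t', t' < m →
        pyget ansL (arr.length - 1 - t') = (t' : Int) -
          sbAux (fun q => pyget arr (arr.length - 1 - q)) (pyget arr (arr.length - 1 - t')) t' := by
      intro t' ht'
      rw [hrel t' (by omega)]
      exact ha1 t' ht'
    obtain ⟨hacc, hchain⟩ :=
      mWhile_run (fun q => pyget arr (arr.length - 1 - q))
        (fun q => pyget ansL (arr.length - 1 - q)) m st hS hmodel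
    have haW := aWhile_rel_rtl arr m ansL hm hlen st 0
      (sinv_lt (fun q => pyget arr (arr.length - 1 - q)) m st hS)
    rw [addAt_zero] at haW
    set W := mWhile (fun q => pyget arr (arr.length - 1 - q))
      (fun q => pyget ansL (arr.length - 1 - q)) m 0 st with hWdef
    have haWk : aWhile arr k ansL (st.map (fun q => arr.length - 1 - q)) =
        (addAt ansL k W.1, W.2.map (fun q => arr.length - 1 - q)) := by
      rw [hk]; exact haW
    have hrev : (List.range (k + 1)).reverse = k :: (List.range k).reverse := by
      simp [List.range_succ]
    rw [hrev]
    simp only [aLoop, haWk]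
    rw [addAt_addAt ansL k _ 1 hik]
    have hmap : (k : Nat) :: W.2.map (fun q => arr.length - 1 - q) =
        (m :: W.2).map (fun q => arr.length - 1 - q) := by
      simp only [List.map_cons]
      rw [← hk]
    rw [hmap]
    refine ih (m + 1) _ _ (fun q => if q = m then W.1 + 1 else a q)
      (by omega) (by simp [addAt, hlen]) ?_ ?_ ?_ ?_ t ht
    · intro t' ht'
      beta_reduce
      by_cases htm' : t' = m
      · subst htm'
        rw [if_pos rfl]
        have hix : arr.length - 1 - t' = k := by omega
        rw [hix]
        unfold pyget addAt
        rw [getD_set_self ansL k _ hik]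
        have h0 : ansL.getD k 0 = 0 := by
          have h1 := hrel t' ht'
          unfold pyget at h1
          rw [hix] at h1
          rw [h1]
          exact ha2 t' (le_refl t')
        rw [h0]; ring
      · rw [if_neg htm']
        unfold pyget addAt
        rw [getD_set_ne ansL k _ _ (by omega)]
        exact hrel t' ht'
    · intro t' ht'
      beta_reduce
      by_cases htm' : t' = m
      · subst htm'
        rw [if_pos rfl, hacc]; ring
      · rw [if_neg htm']
        exact ha1 t' (by omega)
    · intro t' ht'
      beta_reduce
      rw [if_neg (by omega)]
      exact ha2 t' (by omega)
    · exact ⟨rfl, hchain⟩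

theorem scanFwd_sb (arr : List Int) (x : Int) :
    ∀ k, k ≤ arr.length →
      ((scanFwd arr x (arr.length - k) : Nat) : Int) =
        (arr.length : Int) - 1 - sbAux (fun t => pyget arr (arr.length - 1 - t)) x k := by
  intro k
  induction k with
  | zero =>
    intro _
    rw [scanFwd]
    simp only [Nat.sub_zero, lt_irrefl, if_false, sbAux]
    omega
  | succ k ih =>
    intro hk1
    have he : arr.length - (k + 1) = arr.length - 1 - k := by omega
    rw [scanFwd]
    rw [if_pos (by omega : arr.length - (k + 1) < arr.length)]
    simp only [sbAux]
    beta_reduce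
    rw [he]
    by_cases h : pyget arr (arr.length - 1 - k) < x
    · rw [if_pos h, if_pos h]
      have he2 : arr.length - 1 - k + 1 = arr.length - k := by omega
      rw [he2]
      exact ih (by omega)
    · rw [if_neg h, if_neg h]
      omega

-- ===== VERDICT (by name: the statement is the Claim_ definition above) =====
theorem pyget_replicate (n j : Nat) : pyget (List.replicate n (0 : Int)) j = 0 := by
  simp only [pyget, List.getD_eq_getElem?_getD, List.getElem?_replicate]
  split <;> rfl

theorem onesided_count_subarrays_spec : Claim_equal_onesided_count_subarrays := by
  unfold Claim_equal_onesided_count_subarrays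
  intro arr order _
  unfold Spec_onesided_count_subarrays
  simp only [onesided_count_subarrays, onesided_count_subarrays_alt]
  by_cases h : order = "ltr"
  · simp only [if_pos h]
    apply List.ext_getElem
    · simp [aLoop_length]
    · intro i h1 h2
      have hi : i < arr.length := by
        have := aLoop_length arr (List.range arr.length) (List.replicate arr.length 0) []
        simp [this] at h1
        simpa using h1
      rw [List.getElem_map, List.getElem_range]
      rw [← List.getD_eq_getElem _ 0 h1]
      have hmain := aLoop_ltr arr arr.length 0 (List.replicate arr.length 0) [] (fun _ => 0)
        (by omega) (by simp) (fun j => pyget_replicate arr.length j)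
        (fun t ht => absurd ht (by omega)) (fun t _ => rfl) trivial i hi
      rw [List.range_eq_range', scanBack_eq_sbAux]
      exact hmain
  · simp only [if_neg h]
    apply List.ext_getElem
    · simp [aLoop_length]
    · intro p h1 h2
      have hp : p < arr.length := by
        have := aLoop_length arr (List.range arr.length).reverse (List.replicate arr.length 0) []
        simp [this] at h1
        simpa using h1
      rw [List.getElem_map, List.getElem_range]
      rw [← List.getD_eq_getElem _ 0 h1]
      have hmain := aLoop_rtl arr arr.length 0 (List.replicate arr.length 0) [] (fun _ => 0)
        (by omega) (by simp) (fun t _ => pyget_replicate arr.length _)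
        (fun t ht => absurd ht (by omega)) (fun t _ => rfl) trivial
        (arr.length - 1 - p) (by omega)
      have hpp : arr.length - 1 - (arr.length - 1 - p) = p := by omega
      rw [hpp] at hmain
      have hscan := scanFwd_sb arr (pyget arr p) (arr.length - 1 - p) (by omega)
      have hidx : arr.length - (arr.length - 1 - p) = p + 1 := by omega
      rw [hidx] at hscan
      have hmapnil : (([] : List Nat).map (fun q => arr.length - 1 - q)) = [] := rfl
      rw [hmapnil] at hmain
      rw [hscan]
      refine hmain.trans ?_
      generalize sbAux (fun t => pyget arr (arr.length - 1 - t)) (pyget arr p)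
        (arr.length - 1 - p) = S
      omega
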